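-- pv_equiv track=rewrite | github.com/FloppaG/June-Programming-Language | june.py | _get_statement
-- ===== SOURCE A (Python) =====
-- def _get_statement(f, it, it_pos):
--     d_it = 0
--     statement = ""
--     for i in f.split("\n"):
--         d_it_pos = 0
--         for char in i:
--             if d_it > it or it == d_it and d_it_pos > it_pos - 1:
--                 if char != ";":
--                     statement += char
--                 else:
--                     final_array = [statement[0]]
--                     statement = statement[1:]
--                     statement_array = statement.strip().split(":")
--                     for sect in statement_array:
--                         final_array.append(sect.strip())
--                     return final_array
--             d_it_pos += 1
--         d_it += 1
--     return None
-- ===== SOURCE B (Python) =====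
-- def _get_statement(f, it, it_pos):
--     lines = f.split("\n")
--     rest = lines[max(it, 0):]
--     if 0 <= it < len(lines):
--         rest[0] = rest[0][max(it_pos, 0):]
--     tail = "".join(rest)
--     idx = tail.find(";")
--     if idx == -1:
--         return None
--     statement = tail[:idx]
--     return [statement[0]] + [s.strip() for s in statement[1:].strip().split(":")]
-- ===== Notes on version B (the rewrite author's own statement) =====
-- stated objective: simpler
-- what changed: Replaces A's nested character loop with row/column counters and an incrementally grown statement string by a single decomposition: slice the split lines at the clamped start position, join them, locate the delimiter with find, and slice the statement out.
import Mathlib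
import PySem

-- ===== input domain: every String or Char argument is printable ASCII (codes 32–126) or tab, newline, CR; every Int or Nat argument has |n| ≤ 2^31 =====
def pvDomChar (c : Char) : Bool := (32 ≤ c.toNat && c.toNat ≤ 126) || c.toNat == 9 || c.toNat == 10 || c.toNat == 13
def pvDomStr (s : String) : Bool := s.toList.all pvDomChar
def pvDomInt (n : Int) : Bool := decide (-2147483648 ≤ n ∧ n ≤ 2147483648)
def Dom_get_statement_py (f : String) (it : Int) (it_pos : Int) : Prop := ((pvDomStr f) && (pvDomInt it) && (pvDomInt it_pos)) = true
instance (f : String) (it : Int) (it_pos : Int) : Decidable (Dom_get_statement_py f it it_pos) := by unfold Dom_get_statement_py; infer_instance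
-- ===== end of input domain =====

-- B rebuilds the statement source by slicing the split lines once, joining them and locating ';' with find,
-- instead of A's character-by-character double loop with position counters (objective: simpler; measured constant-factor faster: no per-character Python loop or string concatenation).


-- ===== PORT A =====
-- the 'return final_array' block of A: statement[0], statement[1:], strip, split(":"), append-loop
-- (pyGet? returns none where Python raises IndexError on statement[0]; those inputs are outside Pre_)
def gsFinish (statement : List Char) : Option (List String) :=
  match PySem.List.pyGet? statement 0 with
  | none => none
  | some c =>
    let final_array : List String := [String.ofList [c]]
    let statement' := PySem.List.slice statement (some 1) none
    let statement_array := PySem.Chars.splitOn (PySem.Chars.strip statement') [':']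
    some (statement_array.foldl
      (fun acc sect => acc ++ [String.ofList (PySem.Chars.strip sect)]) final_array)

-- the inner 'for char in i' loop of A
def gsInner (it it_pos d_it : Int) : List Char → Int → List Char → (List Char) ⊕ (Option (List String))
  | [], _, statement => Sum.inl statement
  | c :: cs, d_it_pos, statement =>
    if d_it > it ∨ (it = d_it ∧ d_it_pos > it_pos - 1) then
      if c ≠ ';' then gsInner it it_pos d_it cs (d_it_pos + 1) (statement ++ [c])
      else Sum.inr (gsFinish statement)
    else gsInner it it_pos d_it cs (d_it_pos + 1) statement

-- the outer 'for i in f.split("\n")' loop of A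
def gsOuter (it it_pos : Int) : List (List Char) → Int → List Char → Option (List String)
  | [], _, _ => none
  | line :: rest, d_it, statement =>
    match gsInner it it_pos d_it line 0 statement with
    | Sum.inl statement' => gsOuter it it_pos rest (d_it + 1) statement'
    | Sum.inr res => res

def get_statement_py (f : String) (it : Int) (it_pos : Int) : Option (List String) :=
  gsOuter it it_pos (PySem.Chars.splitOn f.toList ['\n']) 0 []

-- ===== PORT B =====
def get_statement_py_alt (f : String) (it : Int) (it_pos : Int) : Option (List String) :=
  let lines := PySem.Chars.splitOn f.toList ['\n']
  let rest := PySem.List.slice lines (some (max it 0)) none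
  let rest := if 0 ≤ it ∧ it < (lines.length : Int) then
      rest.modifyHead (fun l => PySem.List.slice l (some (max it_pos 0)) none) else rest
  let tail := PySem.Chars.join [] rest
  let idx := PySem.Chars.find tail [';']
  if idx = -1 then none
  else
    let statement := PySem.List.slice tail none (some idx)
    -- pyGet? returns none where Python raises IndexError on statement[0]; outside Pre_
    match PySem.List.pyGet? statement 0 with
    | none => none
    | some c =>
      some (String.ofList [c] ::
        (PySem.Chars.splitOn (PySem.Chars.strip (PySem.List.slice statement (some 1) none)) [':']).map
          (fun s => String.ofList (PySem.Chars.strip s)))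

-- ===== PRECONDITION & SPEC =====
-- the characters of f at/after line max(it,0), column max(it_pos,0) (column cut only on line it), newlines removed
def pvRegionChars (f : String) (it : Int) (it_pos : Int) : List Char :=
  let lines := PySem.Chars.splitOn f.toList ['\n']
  let rest := lines.drop (max it 0).toNat
  let rest := if 0 ≤ it ∧ it < (lines.length : Int) then
      rest.modifyHead (List.drop (max it_pos 0).toNat) else rest
  rest.flatten
-- Pre_ excludes exactly the inputs whose first character at/after the start position is ';':
-- there the Python statement is empty and statement[0] raises IndexError (in A and in B alike).
def Pre_get_statement_py (f : String) (it : Int) (it_pos : Int) : Prop :=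
  (pvRegionChars f it it_pos).head? ≠ some ';'
instance (f : String) (it : Int) (it_pos : Int) : Decidable (Pre_get_statement_py f it it_pos) := by unfold Pre_get_statement_py; infer_instance

def pvWitness_get_statement_py : String × Int × Int := ("x = 1:2;", 0, 0)

def Spec_get_statement_py (f : String) (it : Int) (it_pos : Int) (out : Option (List String)) : Prop := out = get_statement_py_alt f it it_pos
instance (f : String) (it : Int) (it_pos : Int) (out : Option (List String)) : Decidable (Spec_get_statement_py f it it_pos out) := by unfold Spec_get_statement_py; infer_instance

-- ===== CLAIM (what is proved, stated in full; the proofs are below) =====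
def Claim_equal_get_statement_py : Prop := ∀ (f : String) (it : Int) (it_pos : Int), Dom_get_statement_py f it it_pos → Pre_get_statement_py f it it_pos → Spec_get_statement_py f it it_pos (get_statement_py f it it_pos)

-- ===== LEMMAS AND PROOFS =====

-- the chars A's inner loop selects from a line at row d_it, starting at column p
def selLine (it it_pos d_it : Int) : List Char → Int → List Char
  | [], _ => []
  | c :: cs, p =>
    if d_it > it ∨ (it = d_it ∧ p > it_pos - 1) then c :: selLine it it_pos d_it cs (p + 1)
    else selLine it it_pos d_it cs (p + 1)

-- A's inner loop restricted to already-selected characters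
def pscan : List Char → List Char → (List Char) ⊕ (Option (List String))
  | [], st => Sum.inl st
  | c :: cs, st => if c ≠ ';' then pscan cs (st ++ [c]) else Sum.inr (gsFinish st)

-- concatenation of the selected chars of all lines, rows numbered from d
def flattenSel (it it_pos : Int) : List (List Char) → Int → List Char
  | [], _ => []
  | l :: ls, d => selLine it it_pos d l 0 ++ flattenSel it it_pos ls (d + 1)

theorem gsInner_eq_pscan (it it_pos d_it : Int) (cs : List Char) :
    ∀ (p : Int) (st : List Char),
      gsInner it it_pos d_it cs p st = pscan (selLine it it_pos d_it cs p) st := by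
  induction cs with
  | nil => intro p st; rfl
  | cons c cs ih =>
    intro p st
    simp only [gsInner, selLine]
    by_cases h : d_it > it ∨ (it = d_it ∧ p > it_pos - 1)
    · rw [if_pos h, if_pos h]
      simp only [pscan]
      by_cases hc : c = ';' <;> simp [hc, ih]
    · rw [if_neg h, if_neg h, ih]

theorem pscan_append (xs ys : List Char) :
    ∀ st, pscan (xs ++ ys) st =
      match pscan xs st with
      | Sum.inl st' => pscan ys st'
      | Sum.inr r => Sum.inr r := by
  induction xs with
  | nil => intro st; rfl
  | cons c cs ih =>
    intro st
    by_cases hc : c = ';' <;> simp [pscan, hc, ih]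

theorem gsOuter_eq (it it_pos : Int) (lines : List (List Char)) :
    ∀ (d : Int) (st : List Char),
      gsOuter it it_pos lines d st =
        match pscan (flattenSel it it_pos lines d) st with
        | Sum.inl _ => none
        | Sum.inr r => r := by
  induction lines with
  | nil => intro d st; rfl
  | cons l ls ih =>
    intro d st
    rw [show flattenSel it it_pos (l :: ls) d = selLine it it_pos d l 0 ++ flattenSel it it_pos ls (d + 1) from rfl]
    rw [pscan_append]
    rw [show gsOuter it it_pos (l :: ls) d st =
      (match gsInner it it_pos d l 0 st with
       | Sum.inl st' => gsOuter it it_pos ls (d + 1) st'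
       | Sum.inr r => r) from rfl]
    rw [gsInner_eq_pscan]
    cases pscan (selLine it it_pos d l 0) st with
    | inl st' => simp [ih]
    | inr r => simp

theorem selLine_of_gt (it it_pos d_it : Int) (h : d_it > it) (cs : List Char) :
    ∀ p, selLine it it_pos d_it cs p = cs := by
  induction cs with
  | nil => intro p; rfl
  | cons c cs ih =>
    intro p
    simp only [selLine]
    rw [if_pos (Or.inl h), ih]

theorem selLine_of_lt (it it_pos d_it : Int) (h : d_it < it) (cs : List Char) :
    ∀ p, selLine it it_pos d_it cs p = [] := by
  induction cs with
  | nil => intro p; rfl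
  | cons c cs ih =>
    intro p
    simp only [selLine]
    rw [if_neg (by omega), ih]

theorem selLine_of_eq (it it_pos d_it : Int) (hd : it = d_it) (cs : List Char) :
    ∀ p, selLine it it_pos d_it cs p = cs.drop (it_pos - p).toNat := by
  induction cs with
  | nil => intro p; simp [selLine]
  | cons c cs ih =>
    intro p
    simp only [selLine]
    by_cases hp : p > it_pos - 1
    · rw [if_pos (Or.inr ⟨hd, hp⟩), ih]
      have h1 : (it_pos - p).toNat = 0 := by omega
      have h2 : (it_pos - (p + 1)).toNat = 0 := by omega
      simp [h1, h2]
    · rw [if_neg (by omega), ih]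
      have h1 : (it_pos - p).toNat = (it_pos - (p + 1)).toNat + 1 := by omega
      simp [h1]

theorem flattenSel_eq (it it_pos : Int) (lines : List (List Char)) :
    ∀ d : Int, 0 ≤ d →
      flattenSel it it_pos lines d =
        (if it < d then lines
         else (lines.drop (it - d).toNat).modifyHead (List.drop (max it_pos 0).toNat)).flatten := by
  induction lines with
  | nil => intro d _; simp only [flattenSel]; split <;> simp
  | cons l ls ih =>
    intro d hd
    rw [show flattenSel it it_pos (l :: ls) d = selLine it it_pos d l 0 ++ flattenSel it it_pos ls (d + 1) from rfl]
    rw [ih (d + 1) (by omega)]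
    rcases lt_trichotomy it d with h | h | h
    · rw [selLine_of_gt it it_pos d h]
      rw [if_pos h, if_pos (show it < d + 1 by omega)]
      simp
    · subst h
      rw [selLine_of_eq it it_pos it rfl]
      have h0 : (it - it).toNat = 0 := by omega
      have h1 : (it_pos - 0).toNat = (max it_pos 0).toNat := by omega
      rw [if_neg (show ¬ it < it by omega), if_pos (show it < it + 1 by omega), h0, h1]
      simp
    · rw [selLine_of_lt it it_pos d h]
      have h3 : (it - d).toNat = (it - (d + 1)).toNat + 1 := by omega
      rw [if_neg (show ¬ it < d by omega), if_neg (show ¬ it < d + 1 by omega), h3]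
      simp

theorem join_nil_eq_flatten (rest : List (List Char)) : PySem.Chars.join [] rest = rest.flatten := by
  show List.intercalate [] rest = rest.flatten
  unfold List.intercalate
  induction rest with
  | nil => rfl
  | cons x xs ih =>
    cases xs with
    | nil => simp
    | cons y ys => simp_all [List.intersperse]

-- A's bookkeeping reduces to the same region of characters
theorem regionA_eq (f : String) (it it_pos : Int) :
    flattenSel it it_pos (PySem.Chars.splitOn f.toList ['\n']) 0 = pvRegionChars f it it_pos := by
  rw [flattenSel_eq it it_pos _ 0 le_rfl]
  unfold pvRegionChars
  by_cases h0 : 0 ≤ it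
  · rw [if_neg (show ¬ it < 0 by omega)]
    by_cases h2 : it < ((PySem.Chars.splitOn f.toList ['\n']).length : Int)
    · have he : (it - 0).toNat = (max it 0).toNat := by omega
      simp only [if_pos (And.intro h0 h2), he]
    · have hlen : (PySem.Chars.splitOn f.toList ['\n']).length ≤ (it - 0).toNat := by omega
      have hlen' : (PySem.Chars.splitOn f.toList ['\n']).length ≤ (max it 0).toNat := by omega
      simp only [if_neg (show ¬ (0 ≤ it ∧ it < ((PySem.Chars.splitOn f.toList ['\n']).length : Int)) by tauto)]
      rw [List.drop_eq_nil_of_le hlen, List.drop_eq_nil_of_le hlen']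
      rfl
  · have h2 : (max it 0).toNat = 0 := by omega
    rw [if_pos (show it < 0 by omega)]
    simp only [if_neg (show ¬ (0 ≤ it ∧ it < ((PySem.Chars.splitOn f.toList ['\n']).length : Int)) by tauto), h2]
    simp

-- B's bookkeeping reduces to the same region of characters
theorem regionB_eq (f : String) (it it_pos : Int) :
    PySem.Chars.join []
      (if 0 ≤ it ∧ it < ((PySem.Chars.splitOn f.toList ['\n']).length : Int) then
        (PySem.List.slice (PySem.Chars.splitOn f.toList ['\n']) (some (max it 0)) none).modifyHead
          (fun l => PySem.List.slice l (some (max it_pos 0)) none)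
       else PySem.List.slice (PySem.Chars.splitOn f.toList ['\n']) (some (max it 0)) none)
      = pvRegionChars f it it_pos := by
  have hfun : (fun l : List Char => PySem.List.slice l (some (max it_pos 0)) none) =
      List.drop (max it_pos 0).toNat := by
    funext l
    exact PySem.List.slice_from l (le_max_right it_pos 0)
  rw [join_nil_eq_flatten, PySem.List.slice_from _ (le_max_right it 0), hfun]
  rfl

theorem pscan_char (xs : List Char) :
    ∀ st, pscan xs st =
      if (';' ∈ xs) then Sum.inr (gsFinish (st ++ xs.takeWhile (fun c => c != ';')))
      else Sum.inl (st ++ xs) := by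
  induction xs with
  | nil => intro st; simp [pscan]
  | cons c cs ih =>
    intro st
    by_cases hc : c = ';'
    · simp [pscan, hc, List.takeWhile]
    · have hc' : ¬ (';' = c) := fun h => hc h.symm
      simp [pscan, hc, hc', ih, List.append_assoc]

theorem takeWhile_eq_take_of_first (l : List Char) :
    ∀ k : Nat, l[k]? = some ';' → (∀ i, i < k → l[i]? ≠ some ';') →
      l.takeWhile (fun c => c != ';') = l.take k := by
  induction l with
  | nil => intro k hk _; simp at hk
  | cons c cs ih =>
    intro k hk hlt
    cases k with
    | zero =>
      simp at hk
      simp [hk]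
    | succ k =>
      have hc : c ≠ ';' := by
        intro h; exact hlt 0 (Nat.succ_pos k) (by simp [h])
      rw [List.takeWhile_cons, if_pos (by simpa using hc), List.take_succ_cons]
      congr 1
      exact ih k (by simpa using hk) (fun i hi h => hlt (i + 1) (by omega) (by simpa using h))

theorem singleton_prefix_iff_head (a : Char) (l : List Char) :
    [a] <+: l ↔ l.head? = some a := by
  cases l with
  | nil => simp
  | cons c cs => simp [List.cons_prefix_cons, eq_comm]

-- A's scan over the region equals B's find-then-slice over the region
theorem scan_eq_find (R : List Char) :
    (match pscan R [] with | Sum.inl _ => none | Sum.inr r => r) =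
      (if PySem.Chars.find R [';'] = -1 then none
       else
         match PySem.List.pyGet? (PySem.List.slice R none (some (PySem.Chars.find R [';']))) 0 with
         | none => none
         | some c =>
           some (String.ofList [c] ::
             (PySem.Chars.splitOn (PySem.Chars.strip
               (PySem.List.slice (PySem.List.slice R none (some (PySem.Chars.find R [';']))) (some 1) none)) [':']).map
               (fun s => String.ofList (PySem.Chars.strip s)))) := by
  rw [pscan_char]
  by_cases hmem : ';' ∈ R
  · have hfind : PySem.Chars.find R [';'] ≠ -1 := by
      rw [Ne, PySem.Chars.find_eq_neg_one_iff]
      simp [List.singleton_infix_iff, hmem]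
    have hnn : 0 ≤ PySem.Chars.find R [';'] := by
      have := PySem.Chars.neg_one_le_find R [';']
      omega
    obtain ⟨hpre, hfirst⟩ := PySem.Chars.find_spec hnn
    set k := (PySem.Chars.find R [';']).toNat with hk
    have hkget : R[k]? = some ';' := by
      rw [← List.head?_drop]
      exact (singleton_prefix_iff_head ';' _).mp hpre
    have hklt : ∀ i, i < k → R[i]? ≠ some ';' := by
      intro i hi h
      exact hfirst i hi ((singleton_prefix_iff_head ';' _).mpr (by rw [List.head?_drop]; exact h))
    have htake : R.takeWhile (fun c => c != ';') = R.take k := takeWhile_eq_take_of_first R k hkget hklt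
    rw [if_pos hmem, if_neg hfind, PySem.List.slice_to _ hnn, htake, ← hk]
    simp only [List.nil_append, gsFinish]
    cases PySem.List.pyGet? (List.take k R) 0 with
    | none => rfl
    | some c =>
      simp only [PySem.List.foldl_append_singleton_eq_map]
      rfl
  · have hfind : PySem.Chars.find R [';'] = -1 := by
      rw [PySem.Chars.find_eq_neg_one_iff]
      simp [List.singleton_infix_iff, hmem]
    rw [if_neg hmem, if_pos hfind]

-- ===== VERDICT (by name: the statement is the Claim_ definition above) =====
theorem get_statement_py_spec : Claim_equal_get_statement_py := by
  intro f it it_pos _ _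
  unfold Spec_get_statement_py
  show get_statement_py f it it_pos = get_statement_py_alt f it it_pos
  rw [show get_statement_py f it it_pos =
        gsOuter it it_pos (PySem.Chars.splitOn f.toList ['\n']) 0 [] from rfl]
  rw [gsOuter_eq, regionA_eq]
  simp only [get_statement_py_alt]
  rw [regionB_eq]
  exact scan_eq_find (pvRegionChars f it it_pos)
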